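-- pv_equiv track=rewrite | github.com/devwithpug/Algorithm_Study | python/goorm_43129.py | dfs
-- ===== SOURCE A (Python) =====
-- def dfs(dic, n, tmp, st, answer, result):
--     if tmp == n:
--         answer.append(result)
--         return
--     for v in dic[st]:
--         if tmp+v <= n:
--             tmp_result = result[:]
--             tmp_result.append(v)
--             dfs(dic, n, tmp+v, v, answer, tmp_result)
--     return answer
-- ===== SOURCE B (Python) =====
-- def dfs(dic, n, tmp, st, answer, result):
--     stack = [(tmp, st, result)]
--     while stack:
--         t, s, r = stack.pop()
--         if t == n:
--             answer.append(r)
--         else: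
--             for v in reversed(dic[s]):
--                 if t + v <= n:
--                     stack.append((t + v, v, r + [v]))
--     return answer
-- ===== Notes on version B (the rewrite author's own statement) =====
-- stated objective: alternative
-- what changed: Replaces A's recursion that threads a mutated answer list through recursive calls by an explicit-stack iterative DFS (children pushed in reverse so the visit and append order is identical).
-- outside the precondition, e.g. on dfs({1: [1]}, 0, 0, 1, [], []): A returns None, B returns [[]]; on dfs({1: [2], 2: [0]}, 3, 1, 1, [], []): A returns [[2]], B returns [[2]]; on dfs({1: [2]}, 3, 1, 1, [], []): A returns [[2]], B returns [[2]]
import Mathlib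
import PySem

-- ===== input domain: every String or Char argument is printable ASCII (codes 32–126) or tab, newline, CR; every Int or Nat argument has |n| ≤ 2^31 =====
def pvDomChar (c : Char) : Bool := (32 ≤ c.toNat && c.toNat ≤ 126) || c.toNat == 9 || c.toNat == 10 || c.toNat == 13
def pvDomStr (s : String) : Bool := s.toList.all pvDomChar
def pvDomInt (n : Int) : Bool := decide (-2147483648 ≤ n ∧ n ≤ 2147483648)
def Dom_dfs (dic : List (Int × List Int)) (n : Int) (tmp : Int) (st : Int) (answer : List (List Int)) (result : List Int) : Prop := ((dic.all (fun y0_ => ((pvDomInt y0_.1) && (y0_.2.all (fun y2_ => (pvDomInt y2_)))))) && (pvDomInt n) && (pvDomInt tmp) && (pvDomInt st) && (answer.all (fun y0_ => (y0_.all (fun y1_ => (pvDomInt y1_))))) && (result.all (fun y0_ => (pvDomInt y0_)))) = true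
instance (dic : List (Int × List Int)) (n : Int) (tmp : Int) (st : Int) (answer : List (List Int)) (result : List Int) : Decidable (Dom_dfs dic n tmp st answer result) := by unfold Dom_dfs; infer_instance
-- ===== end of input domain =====

-- B replaces A's recursion by an explicit-stack iterative DFS (children pushed in reverse, so the
-- visit and append order is identical); same cost, different decomposition. Both A and B mutate
-- `answer` in place in Python; the equivalence proved here is about the return value.

-- ===== PORT A =====
-- A's recursion, fuel-guarded for totality only: under Pre_dfs every edge value is ≥ 1, so the
-- recursion depth is at most (n - tmp).toNat and the initial fuel below is never exhausted.
def dfsGo (dic : List (Int × List Int)) (n : Int) : Nat → Int → Int → List (List Int) → List Int → List (List Int)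
  | 0, _, _, answer, _ => answer
  | f + 1, tmp, st, answer, result =>
    if tmp = n then answer ++ [result]
    else ((List.lookup st dic).getD []).foldl
      (fun ans v => if tmp + v ≤ n then dfsGo dic n f (tmp + v) v ans (result ++ [v]) else ans) answer

def dfs (dic : List (Int × List Int)) (n : Int) (tmp : Int) (st : Int) (answer : List (List Int)) (result : List Int) : List (List Int) :=
  dfsGo dic n ((n - tmp).toNat + 1) tmp st answer result

-- ===== PORT B =====
-- fuel bound for the while loop: 1 + the largest out-degree in dic, used as a branching bound
def maxDeg (dic : List (Int × List Int)) : Nat := dic.foldl (fun m p => max m p.2.length) 1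

-- `for v in reversed(dic[s]): if t+v <= n: stack.append(...)`, stack head = top
def pushKids (dic : List (Int × List Int)) (n t s : Int) (r : List Int) (stk : List (Int × Int × List Int)) : List (Int × Int × List Int) :=
  ((List.lookup s dic).getD []).reverse.foldl
    (fun stk v => if t + v ≤ n then (t + v, v, r ++ [v]) :: stk else stk) stk

-- the `while stack:` loop; fuel bounds the number of iterations (totality guard only)
def loopB (dic : List (Int × List Int)) (n : Int) : Nat → List (Int × Int × List Int) → List (List Int) → List (List Int)
  | 0, _, ans => ans
  | _ + 1, [], ans => ans
  | f + 1, (t, s, r) :: rest, ans =>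
    if t = n then loopB dic n f rest (ans ++ [r])
    else loopB dic n f (pushKids dic n t s r rest) ans

def dfs_alt (dic : List (Int × List Int)) (n : Int) (tmp : Int) (st : Int) (answer : List (List Int)) (result : List Int) : List (List Int) :=
  loopB dic n ((maxDeg dic + 1) ^ ((n - tmp).toNat + 1)) [(tmp, st, result)] answer

-- ===== PRECONDITION & SPEC =====
-- Pre_ excludes the inputs on which A raises (KeyError on a key missing from dic, or unbounded
-- recursion when an edge value ≤ 0 is followed) or returns None instead of a list (tmp == n at
-- entry); being closed-form it also excludes some inputs whose bad key or value is never reached,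
-- on which A and B agree.  (An edge v can only ever be followed if tmp + v ≤ n, since node values
-- start at tmp and never decrease while every followable edge value is ≥ 1.)
def Pre_dfs (dic : List (Int × List Int)) (n : Int) (tmp : Int) (st : Int) (answer : List (List Int)) (result : List Int) : Prop :=
  tmp ≠ n ∧ (List.lookup st dic).isSome = true ∧
    ∀ p ∈ dic, ∀ v ∈ p.2, tmp + v ≤ n → 1 ≤ v ∧ (List.lookup v dic).isSome = true
instance (dic : List (Int × List Int)) (n : Int) (tmp : Int) (st : Int) (answer : List (List Int)) (result : List Int) : Decidable (Pre_dfs dic n tmp st answer result) := by unfold Pre_dfs; infer_instance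

def pvWitness_dfs : (List (Int × List Int)) × Int × Int × Int × List (List Int) × List Int :=
  ([(1, [1, 2]), (2, [1])], 3, 0, 1, [], [])

def Spec_dfs (dic : List (Int × List Int)) (n : Int) (tmp : Int) (st : Int) (answer : List (List Int)) (result : List Int) (out : List (List Int)) : Prop := out = dfs_alt dic n tmp st answer result
instance (dic : List (Int × List Int)) (n : Int) (tmp : Int) (st : Int) (answer : List (List Int)) (result : List Int) (out : List (List Int)) : Decidable (Spec_dfs dic n tmp st answer result out) := by unfold Spec_dfs; infer_instance

-- ===== CLAIM (what is proved, stated in full; the proofs are below) =====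
def Claim_equal_dfs : Prop := ∀ (dic : List (Int × List Int)) (n : Int) (tmp : Int) (st : Int) (answer : List (List Int)) (result : List Int), Dom_dfs dic n tmp st answer result → Pre_dfs dic n tmp st answer result → Spec_dfs dic n tmp st answer result (dfs dic n tmp st answer result)

-- ===== LEMMAS AND PROOFS =====

-- dic is closed on the followable part: every edge value that could ever be followed when the
-- traversal starts at t0 (i.e. with t0 + v ≤ n) is ≥ 1 and is itself a key
def GoodDic (dic : List (Int × List Int)) (n t0 : Int) : Prop :=
  ∀ p ∈ dic, ∀ v ∈ p.2, t0 + v ≤ n → 1 ≤ v ∧ (List.lookup v dic).isSome = true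

def wt (dic : List (Int × List Int)) (n : Int) (fr : Int × Int × List Int) : Nat :=
  (maxDeg dic + 1) ^ ((n - fr.1).toNat)

def swt (dic : List (Int × List Int)) (n : Int) (stk : List (Int × Int × List Int)) : Nat :=
  (stk.map (wt dic n)).sum

-- the filtered child frames of a popped frame, in visit order
def kids (n t : Int) (l : List Int) (r : List Int) : List (Int × Int × List Int) :=
  l.filterMap (fun v => if t + v ≤ n then some (t + v, v, r ++ [v]) else none)

-- A's recursion applied to each frame of a stack in turn
def runFrames (dic : List (Int × List Int)) (n : Int) (stk : List (Int × Int × List Int)) (ans : List (List Int)) : List (List Int) :=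
  stk.foldl (fun a fr => dfsGo dic n ((n - fr.1).toNat + 1) fr.1 fr.2.1 a fr.2.2) ans

theorem lookup_mem {dic : List (Int × List Int)} {k : Int} {l : List Int}
    (h : List.lookup k dic = some l) : (k, l) ∈ dic := by
  induction dic with
  | nil => simp [List.lookup] at h
  | cons p rest ih =>
    obtain ⟨a, b⟩ := p
    by_cases hk : k = a
    · subst hk
      simp [List.lookup] at h
      subst h
      exact List.mem_cons_self
    · have hb : (k == a) = false := beq_eq_false_iff_ne.mpr hk
      simp only [List.lookup, hb] at h
      exact List.mem_cons_of_mem _ (ih h)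

theorem foldr_pushes (c : Int → Prop) [DecidablePred c] (g : Int → (Int × Int × List Int))
    (l : List Int) (stk : List (Int × Int × List Int)) :
    l.foldr (fun v s => if c v then g v :: s else s) stk
      = (l.filterMap (fun v => if c v then some (g v) else none)) ++ stk := by
  induction l with
  | nil => simp
  | cons x xs ih => by_cases hx : c x <;> simp [hx, ih]

theorem pushKids_eq (dic : List (Int × List Int)) (n t s : Int) (r : List Int)
    (stk : List (Int × Int × List Int)) :
    pushKids dic n t s r stk = kids n t ((List.lookup s dic).getD []) r ++ stk := by
  rw [pushKids, List.foldl_reverse, kids]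
  exact foldr_pushes (fun v => t + v ≤ n) _ _ stk

theorem foldl_filterMap_if (c : Int → Prop) [DecidablePred c] (g : Int → (Int × Int × List Int))
    (h : List (List Int) → (Int × Int × List Int) → List (List Int)) (l : List Int) (a : List (List Int)) :
    (l.filterMap (fun v => if c v then some (g v) else none)).foldl h a
      = l.foldl (fun a v => if c v then h a (g v) else a) a := by
  induction l generalizing a with
  | nil => simp
  | cons x xs ih => by_cases hx : c x <;> simp [hx, ih]

theorem foldl_max_init_le (l : List (Int × List Int)) :
    ∀ i : Nat, i ≤ l.foldl (fun m p => max m p.2.length) i := by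
  induction l with
  | nil => intro i; simp
  | cons u us ih => intro i; exact le_trans (le_max_left _ _) (ih _)

theorem foldl_max_ge_mem (l : List (Int × List Int)) :
    ∀ (i : Nat) (p : Int × List Int), p ∈ l → p.2.length ≤ l.foldl (fun m p => max m p.2.length) i := by
  induction l with
  | nil => intro i p hp; simp at hp
  | cons u us ih =>
    intro i p hp
    rcases List.mem_cons.mp hp with hp | hp
    · subst hp
      exact le_trans (le_max_right i p.2.length) (foldl_max_init_le us _)
    · exact ih _ p hp

theorem maxDeg_ge {dic : List (Int × List Int)} {p : Int × List Int} (hp : p ∈ dic) :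
    p.2.length ≤ maxDeg dic := foldl_max_ge_mem dic 1 p hp

theorem wt_pos (dic : List (Int × List Int)) (n : Int) (fr : Int × Int × List Int) : 1 ≤ wt dic n fr :=
  Nat.one_le_pow _ _ (by omega)

theorem dfsGo_fuel (dic : List (Int × List Int)) (n t0 : Int) (hg : GoodDic dic n t0) :
    ∀ f1 f2 (t s : Int) (ans : List (List Int)) (r : List Int),
      t0 ≤ t → (List.lookup s dic).isSome = true → (n - t).toNat < f1 → (n - t).toNat < f2 →
      dfsGo dic n f1 t s ans r = dfsGo dic n f2 t s ans r := by
  intro f1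
  induction f1 with
  | zero => intro f2 t s ans r _ _ h1 _; omega
  | succ g1 ih =>
    intro f2 t s ans r ht0 hs h1 h2
    obtain ⟨g2, rfl⟩ : ∃ g2, f2 = g2 + 1 := ⟨f2 - 1, by omega⟩
    rw [dfsGo, dfsGo]
    by_cases ht : t = n
    · simp [ht]
    · simp only [if_neg ht]
      obtain ⟨L, hL⟩ := Option.isSome_iff_exists.mp hs
      rw [hL]
      simp only [Option.getD_some]
      apply PySem.List.foldl_congr_mem
      intro acc v hv
      by_cases hc : t + v ≤ n
      · have hgv := hg _ (lookup_mem hL) v hv (by omega)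
        simp only [if_pos hc]
        exact ih g2 (t + v) v acc (r ++ [v]) (by omega) hgv.2 (by omega) (by omega)
      · simp [hc]

theorem swt_cons (dic : List (Int × List Int)) (n : Int) (fr : Int × Int × List Int)
    (stk : List (Int × Int × List Int)) : swt dic n (fr :: stk) = wt dic n fr + swt dic n stk := by
  simp [swt]

-- each loop iteration strictly decreases the total weight of the stack; with fuel at least that
-- weight, the loop computes exactly A's recursion run over the stacked frames
theorem loopB_eq_runFrames (dic : List (Int × List Int)) (n t0 : Int) (hg : GoodDic dic n t0) :
    ∀ (f : Nat) (stk : List (Int × Int × List Int)) (ans : List (List Int)),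
      (∀ fr ∈ stk, t0 ≤ fr.1 ∧ (List.lookup fr.2.1 dic).isSome = true) →
      swt dic n stk ≤ f →
      loopB dic n f stk ans = runFrames dic n stk ans := by
  intro f
  induction f with
  | zero =>
    intro stk ans _ hw
    cases stk with
    | nil => rfl
    | cons fr rest => exfalso; have := wt_pos dic n fr; rw [swt_cons] at hw; omega
  | succ f ih =>
    intro stk ans hgood hw
    cases stk with
    | nil => rfl
    | cons fr rest =>
      obtain ⟨t, s, r⟩ := fr
      rw [swt_cons] at hw
      obtain ⟨ht0, hs⟩ : t0 ≤ t ∧ (List.lookup s dic).isSome = true := hgood (t, s, r) (by simp)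
      by_cases ht : t = n
      · rw [loopB, if_pos ht]
        rw [ih rest (ans ++ [r]) (fun fr h => hgood fr (by simp [h]))
          (by have := wt_pos dic n (t, s, r); omega)]
        simp only [runFrames, List.foldl_cons]
        congr 1
        simp only [dfsGo, if_pos ht]
      · rw [loopB, if_neg ht, pushKids_eq]
        obtain ⟨L, hL⟩ := Option.isSome_iff_exists.mp hs
        rw [hL]; simp only [Option.getD_some]
        have hLmem := lookup_mem hL
        have hLlen : L.length ≤ maxDeg dic := maxDeg_ge hLmem
        -- weight bound for the children
        have hkids : swt dic n (kids n t L r) + 1 ≤ wt dic n (t, s, r) := by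
          by_cases htn : t < n
          · have hd : 1 ≤ (n - t).toNat := by omega
            have hone : ∀ fr ∈ kids n t L r, wt dic n fr ≤ (maxDeg dic + 1) ^ ((n - t).toNat - 1) := by
              intro fr hfr
              rw [kids] at hfr
              obtain ⟨v, hv, hfe⟩ := List.mem_filterMap.mp hfr
              by_cases hc : t + v ≤ n
              · simp only [if_pos hc, Option.some.injEq] at hfe
                have hv1 : 1 ≤ v := (hg _ hLmem v hv (by omega)).1
                rw [← hfe, wt]
                exact Nat.pow_le_pow_right (by omega) (by simp; omega)
              · simp [hc] at hfe
            have hsum : swt dic n (kids n t L r) ≤ (kids n t L r).length * (maxDeg dic + 1) ^ ((n - t).toNat - 1) := by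
              rw [swt]
              have := List.sum_le_card_nsmul ((kids n t L r).map (wt dic n))
                ((maxDeg dic + 1) ^ ((n - t).toNat - 1))
                (by intro x hx; obtain ⟨fr, hfr, rfl⟩ := List.mem_map.mp hx; exact hone fr hfr)
              simpa [smul_eq_mul] using this
            have hlen : (kids n t L r).length ≤ maxDeg dic := by
              rw [kids]; exact le_trans (List.length_filterMap_le _ _) hLlen
            have hPpos : 1 ≤ (maxDeg dic + 1) ^ ((n - t).toNat - 1) := Nat.one_le_pow _ _ (by omega)
            have hwt : wt dic n (t, s, r) = (maxDeg dic + 1) ^ ((n - t).toNat - 1) * (maxDeg dic + 1) := by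
              rw [wt, ← pow_succ]
              congr 1
              omega
            rw [hwt]
            calc swt dic n (kids n t L r) + 1
                ≤ (kids n t L r).length * (maxDeg dic + 1) ^ ((n - t).toNat - 1) + 1 := by omega
              _ ≤ maxDeg dic * (maxDeg dic + 1) ^ ((n - t).toNat - 1) + (maxDeg dic + 1) ^ ((n - t).toNat - 1) := by
                  have := Nat.mul_le_mul_right ((maxDeg dic + 1) ^ ((n - t).toNat - 1)) hlen
                  omega
              _ = (maxDeg dic + 1) ^ ((n - t).toNat - 1) * (maxDeg dic + 1) := by ring
          · -- t > n: no child passes the bound t + v ≤ n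
            have hnil : kids n t L r = [] := by
              rw [kids, List.filterMap_eq_nil_iff]
              intro v hv
              simp only [ite_eq_right_iff]
              intro hc
              have hv1 : 1 ≤ v := (hg _ hLmem v hv (by omega)).1
              exfalso; omega
            rw [hnil]
            have := wt_pos dic n (t, s, r)
            simpa [swt] using this
        have hgood' : ∀ fr ∈ kids n t L r ++ rest, t0 ≤ fr.1 ∧ (List.lookup fr.2.1 dic).isSome = true := by
          intro fr hfr
          rcases List.mem_append.mp hfr with h | h
          · rw [kids] at h
            obtain ⟨v, hv, hfe⟩ := List.mem_filterMap.mp h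
            by_cases hc : t + v ≤ n
            · simp only [if_pos hc, Option.some.injEq] at hfe
              have hgv := hg _ hLmem v hv (by omega)
              rw [← hfe]
              exact ⟨by simp; omega, hgv.2⟩
            · simp [hc] at hfe
          · exact hgood fr (by simp [h])
        rw [ih (kids n t L r ++ rest) ans hgood'
          (by simp only [swt, List.map_append, List.sum_append] at *; omega)]
        simp only [runFrames, List.foldl_append, List.foldl_cons]
        congr 1
        -- running A on the children frames = one unfolding of A on the popped frame
        simp only [dfsGo, if_neg ht, hL, Option.getD_some]
        rw [kids, foldl_filterMap_if (fun v => t + v ≤ n)]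
        apply PySem.List.foldl_congr_mem
        intro acc v hv
        by_cases hc : t + v ≤ n
        · simp only [if_pos hc]
          have hgv := hg _ hLmem v hv (by omega)
          exact dfsGo_fuel dic n t0 hg ((n - (t + v)).toNat + 1) ((n - t).toNat) (t + v) v acc
            (r ++ [v]) (by omega) hgv.2 (by omega) (by omega)
        · simp [hc]

-- ===== VERDICT (by name: the statement is the Claim_ definition above) =====
theorem dfs_spec : Claim_equal_dfs := by
  intro dic n tmp st answer result _ hpre
  obtain ⟨htmp, hst, hg⟩ := hpre
  show dfs dic n tmp st answer result = dfs_alt dic n tmp st answer result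
  rw [dfs, dfs_alt]
  rw [loopB_eq_runFrames dic n tmp hg _ [(tmp, st, result)] answer
    (by intro fr hfr; simp at hfr; subst hfr; exact ⟨le_refl _, hst⟩)
    (by
      simp only [swt, List.map_cons, List.map_nil, List.sum_cons, List.sum_nil, Nat.add_zero, wt]
      exact Nat.pow_le_pow_right (by omega) (by omega))]
  rw [runFrames, List.foldl_cons, List.foldl_nil]
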